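-- pv_equiv track=rewrite | github.com/GitHany/YuanbaoSectBot | algorithms/string/kmp.py | kmp_longest_prefix_suffix
-- ===== SOURCE A (Python) =====
-- def kmp_preprocess(pattern):
--     """
--     预处理模式串，构建前缀表
--
--     参数:
--         pattern (str): 模式字符串
--
--     返回:
--         list: 前缀表（最长前缀后缀长度）
--     """
--     m = len(pattern)
--     prefix_table = [0] * m
--     length = 0
--     i = 1
--
--     while i < m:
--         if pattern[i] == pattern[length]:
--             length += 1
--             prefix_table[i] = length
--             i += 1
--         else:
--             if length != 0:
--                 length = prefix_table[length - 1]
--             else: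
--                 prefix_table[i] = 0
--                 i += 1
--
--     return prefix_table
--
-- def kmp_longest_prefix_suffix(pattern):
--     """
--     计算模式串的最长前缀后缀
--
--     参数:
--         pattern (str): 模式字符串
--
--     返回:
--         int: 最长前缀后缀长度
--     """
--     m = len(pattern)
--     prefix_table = kmp_preprocess(pattern)
--
--     max_lps = 0
--     for i in range(m):
--         if prefix_table[i] > max_lps:
--             max_lps = prefix_table[i]
--
--     return max_lps
-- ===== SOURCE B (Python) =====
-- def kmp_longest_prefix_suffix(pattern):
--     # No failure table: for each later start p, extend a character-by-character
--     # match against the prefix (naive Z-function); the answer is the largest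
--     # match length, since every border of every prefix is such a match.
--     m = len(pattern)
--     best = 0
--     for p in range(1, m):
--         k = 0
--         while p + k < m and pattern[k] == pattern[p + k]:
--             k += 1
--         if k > best:
--             best = k
--     return best
-- ===== Notes on version B (the rewrite author's own statement) =====
-- stated objective: alternative
-- what changed: B drops the KMP failure-table construction entirely: it scans each later start position, extending a character-by-character match against the prefix (a naive Z-function), and returns the largest match length; equivalence is the border/occurrence duality between the prefix function and Z-values.
import Mathlib
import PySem

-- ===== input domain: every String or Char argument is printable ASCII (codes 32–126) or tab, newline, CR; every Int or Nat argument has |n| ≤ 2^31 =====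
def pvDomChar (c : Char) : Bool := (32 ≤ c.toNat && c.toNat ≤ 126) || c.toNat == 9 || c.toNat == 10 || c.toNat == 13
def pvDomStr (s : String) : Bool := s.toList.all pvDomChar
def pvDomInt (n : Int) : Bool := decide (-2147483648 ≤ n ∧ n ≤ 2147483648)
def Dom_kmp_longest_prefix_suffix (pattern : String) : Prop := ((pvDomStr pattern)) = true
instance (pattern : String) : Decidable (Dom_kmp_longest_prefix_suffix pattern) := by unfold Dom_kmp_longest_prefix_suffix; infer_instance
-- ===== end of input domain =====

-- B replaces A's KMP failure-table construction by a naive Z-function scan (longest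
-- character-by-character match of each suffix against the prefix); an alternative
-- algorithm, not faster; proved to return the same value on all inputs.

-- ===== PORT A =====
-- the while loop of kmp_preprocess; fuel 2*m is an upper bound on its iteration count
-- (each step increases i or strictly decreases length), making the transcription total.
def kmpLoop (s : List Char) (m : Nat) : Nat → Nat → Nat → List Nat → List Nat
  | 0, _, _, tbl => tbl
  | fuel+1, i, len, tbl =>
    if i < m then
      -- pattern[i] == pattern[length]; both indices are in range whenever Python reaches this test
      if s.getD i ' ' = s.getD len ' ' then
        kmpLoop s m fuel (i+1) (len+1) (tbl.set i (len+1))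
      else if len ≠ 0 then
        kmpLoop s m fuel i (tbl.getD (len-1) 0) tbl
      else
        kmpLoop s m fuel (i+1) 0 (tbl.set i 0)
    else tbl

def kmp_preprocess (s : List Char) : List Nat :=
  kmpLoop s s.length (2 * s.length) 1 0 (List.replicate s.length 0)

def kmp_longest_prefix_suffix (pattern : String) : Int :=
  let s := pattern.toList
  let m := s.length
  let tbl := kmp_preprocess s
  -- for i in range(m): if prefix_table[i] > max_lps: max_lps = prefix_table[i]
  Int.ofNat ((List.range m).foldl (fun acc i => if tbl.getD i 0 > acc then tbl.getD i 0 else acc) 0)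

-- ===== PORT B =====
-- inner while loop: k = 0; while p + k < m and pattern[k] == pattern[p + k]: k += 1
-- (both indices are in range whenever Python evaluates the comparison, since 1 <= p and p + k < m)
def zrun (s : List Char) (p k : Nat) : Nat :=
  if p + k < s.length ∧ s.getD k ' ' = s.getD (p + k) ' ' then zrun s p (k+1) else k
termination_by s.length - (p + k)
decreasing_by omega

def kmp_longest_prefix_suffix_alt (pattern : String) : Int :=
  let s := pattern.toList
  let m := s.length
  -- for p in range(1, m): k = zrun...; if k > best: best = k
  Int.ofNat ((List.range' 1 (m - 1)).foldl
    (fun best p => if zrun s p 0 > best then zrun s p 0 else best) 0)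

-- ===== PRECONDITION & SPEC =====
def Spec_kmp_longest_prefix_suffix (pattern : String) (out : Int) : Prop := out = kmp_longest_prefix_suffix_alt pattern
instance (pattern : String) (out : Int) : Decidable (Spec_kmp_longest_prefix_suffix pattern out) := by unfold Spec_kmp_longest_prefix_suffix; infer_instance

-- ===== CLAIM (what is proved, stated in full; the proofs are below) =====
def Claim_equal_kmp_longest_prefix_suffix : Prop := ∀ (pattern : String), Dom_kmp_longest_prefix_suffix pattern → Spec_kmp_longest_prefix_suffix pattern (kmp_longest_prefix_suffix pattern)

-- ===== LEMMAS AND PROOFS =====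

-- `Bord s n k`: the prefix of length k of s is also a suffix of the prefix of length n
abbrev Bord (s : List Char) (n k : Nat) : Prop := s.take k = (s.drop (n - k)).take k

-- the prefix function: length of the longest proper border of s.take n
def pf (s : List Char) (n : Nat) : Nat := Nat.findGreatest (Bord s n) (n - 1)

-- running maximum of pf over prefix lengths 1..n
def Vmax (s : List Char) : Nat → Nat
  | 0 => 0
  | n+1 => max (Vmax s n) (pf s (n+1))

theorem bord_zero (s : List Char) (n : Nat) : Bord s n 0 := by simp [Bord]

theorem bord_iff (s : List Char) {n k : Nat} :
    Bord s n k ↔ ∀ t, t < k → s[t]? = s[n - k + t]? := by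
  constructor
  · intro h t ht
    have := congrArg (fun l => l[t]?) h
    simpa [List.getElem?_take, List.getElem?_drop, ht] using this
  · intro h
    apply List.ext_getElem?_iff.mpr
    intro t
    by_cases ht : t < k
    · simp [List.getElem?_drop, ht, h t ht]
    · simp [ht]

theorem pf_le (s : List Char) (n : Nat) : pf s n ≤ n - 1 := Nat.findGreatest_le _

theorem pf_bord (s : List Char) (n : Nat) : Bord s n (pf s n) :=
  Nat.findGreatest_spec (Nat.zero_le _) (bord_zero s n)

theorem pf_one (s : List Char) : pf s 1 = 0 := by simp [pf]

theorem getD_eq_iff (s : List Char) {i j : Nat} (hi : i < s.length) (hj : j < s.length) :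
    (s.getD i ' ' = s.getD j ' ') ↔ s[i]? = s[j]? := by
  simp [List.getD_eq_getElem?_getD, hi, hj]

theorem bord_ext (s : List Char) {i len : Nat} (hlen : len < i)
    (h6 : Bord s i len) (hc : s[i]? = s[len]?) : Bord s (i+1) (len+1) := by
  rw [bord_iff] at h6 ⊢
  intro t ht
  rcases Nat.lt_or_ge t len with h | h
  · have := h6 t h
    have harith : i - len + t = i + 1 - (len + 1) + t := by omega
    rwa [harith] at this
  · have ht' : t = len := by omega
    have harith : i + 1 - (len + 1) + t = i := by omega
    rw [harith, ht']; exact hc.symm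

theorem bord_drop (s : List Char) {i b : Nat} (hb : 1 ≤ b) (hbi : b ≤ i + 1)
    (h : Bord s (i+1) b) : Bord s i (b-1) ∧ s[i]? = s[b-1]? := by
  rw [bord_iff] at h
  constructor
  · rw [bord_iff]
    intro t ht
    have := h t (by omega)
    have harith : i + 1 - b + t = i - (b - 1) + t := by omega
    rwa [harith] at this
  · have := h (b-1) (by omega)
    have harith : i + 1 - b + (b - 1) = i := by omega
    rw [harith] at this; exact this.symm

theorem bord_trans (s : List Char) {i len len' : Nat} (hl : len' ≤ len) (hli : len ≤ i)
    (h1 : Bord s len len') (h2 : Bord s i len) : Bord s i len' := by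
  rw [bord_iff] at h1 h2 ⊢
  intro t ht
  have e1 := h1 t ht
  have e2 := h2 (len - len' + t) (by omega)
  have harith : i - len + (len - len' + t) = i - len' + t := by omega
  rw [harith] at e2
  exact e1.trans e2

theorem bord_nest (s : List Char) {i len b : Nat} (hb : b ≤ len) (hli : len ≤ i)
    (h1 : Bord s i b) (h2 : Bord s i len) : Bord s len b := by
  rw [bord_iff] at h1 h2 ⊢
  intro t ht
  have e1 := h1 t ht
  have e2 := h2 (len - b + t) (by omega)
  have harith : i - len + (len - b + t) = i - b + t := by omega
  rw [harith] at e2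
  exact e1.trans e2.symm

theorem kmpLoop_inv (s : List Char) : ∀ (fuel : Nat),
    ∀ (i len : Nat) (tbl : List Nat),
    1 ≤ i → i ≤ s.length → tbl.length = s.length →
    (∀ j, j < i → tbl.getD j 0 = pf s (j+1)) →
    len < i →
    Bord s i len →
    (∀ b, 1 ≤ b → b ≤ i → Bord s (i+1) b → b ≤ len + 1) →
    2 * (s.length - i) + len + 1 ≤ fuel →
    ∀ j, j < s.length → (kmpLoop s s.length fuel i len tbl).getD j 0 = pf s (j+1)
  | 0 => by intro i len tbl h1 h1' h2 h3 h5 h6 h7 h8; omega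
  | fuel+1 => by
    intro i len tbl h1 h1' h2 h3 h5 h6 h7 h8 j hj
    rw [kmpLoop]
    by_cases hi : i < s.length
    · rw [if_pos hi]
      by_cases hc : s.getD i ' ' = s.getD len ' '
      · -- match: extend the border
        rw [if_pos hc]
        have hc' : s[i]? = s[len]? := (getD_eq_iff s hi (by omega)).mp hc
        have hb1 : Bord s (i+1) (len+1) := bord_ext s h5 h6 hc'
        have hpf : pf s (i+1) = len + 1 := by
          apply Nat.le_antisymm
          · by_contra hgt
            have hg1 : 1 ≤ pf s (i+1) := by omega
            have := h7 (pf s (i+1)) hg1 (by have := pf_le s (i+1); omega) (pf_bord s (i+1))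
            omega
          · exact Nat.le_findGreatest (by omega) hb1
        apply kmpLoop_inv s fuel (i+1) (len+1) _ (by omega) (by omega)
          (by simpa using h2)
        · -- table invariant
          intro j' hj'
          rcases Nat.lt_or_ge j' i with hji | hji
          · rw [List.getD_eq_getElem?_getD, List.getElem?_set, if_neg (by omega),
              ← List.getD_eq_getElem?_getD]
            exact h3 j' hji
          · have : j' = i := by omega
            subst this
            rw [List.getD_eq_getElem?_getD, List.getElem?_set, if_pos rfl, if_pos (by omega)]
            simpa using hpf.symm
        · omega
        · exact hb1
        · -- candidate bound for i+1
          intro b hb hbi hbord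
          have hd := bord_drop s hb (by omega) hbord
          rcases Nat.eq_or_lt_of_le hb with hb1' | hb1'
          · omega
          · have := Nat.le_findGreatest (m := b - 1) (n := i) (by omega) hd.1
            rw [show Nat.findGreatest (Bord s (i+1)) i = pf s (i+1) from rfl] at this
            omega
        · omega
        · exact hj
      · rw [if_neg hc]
        have hcne : s[i]? ≠ s[len]? := fun h => hc ((getD_eq_iff s hi (by omega)).mpr h)
        by_cases hl0 : len = 0
        · -- mismatch at length 0: pf (i+1) = 0, move on
          rw [if_neg (by simp [hl0])]
          subst hl0
          have hpf : pf s (i+1) = 0 := by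
            rw [pf]
            apply Nat.findGreatest_eq_zero_iff.mpr
            intro b hb hbi hbord
            have hd := bord_drop s (by omega) (by omega) hbord
            rcases Nat.eq_or_lt_of_le hb with hb1' | hb1'
            · exact hcne (by simpa [← hb1'] using hd.2)
            · have := h7 b (by omega) (by omega) hbord
              omega
          apply kmpLoop_inv s fuel (i+1) 0 _ (by omega) (by omega) (by simpa using h2)
          · intro j' hj'
            rcases Nat.lt_or_ge j' i with hji | hji
            · rw [List.getD_eq_getElem?_getD, List.getElem?_set, if_neg (by omega),
                ← List.getD_eq_getElem?_getD]
              exact h3 j' hji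
            · have : j' = i := by omega
              subst this
              rw [List.getD_eq_getElem?_getD, List.getElem?_set, if_pos rfl, if_pos (by omega)]
              simpa using hpf.symm
          · omega
          · exact bord_zero s (i+1)
          · intro b hb hbi hbord
            have hd := bord_drop s hb (by omega) hbord
            have := Nat.le_findGreatest (m := b - 1) (n := i) (by omega) hd.1
            rw [show Nat.findGreatest (Bord s (i+1)) i = pf s (i+1) from rfl, hpf] at this
            omega
          · omega
          · exact hj
        · -- mismatch, fall back along the border chain
          rw [if_pos hl0]
          have hlen1 : 1 ≤ len := by omega
          have htb : tbl.getD (len - 1) 0 = pf s len := by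
            have := h3 (len - 1) (by omega)
            rwa [Nat.sub_add_cancel hlen1] at this
          rw [htb]
          have hple : pf s len ≤ len - 1 := pf_le s len
          apply kmpLoop_inv s fuel i (pf s len) tbl h1 h1' h2 h3 (by omega)
          · exact bord_trans s (by omega) (by omega) (pf_bord s len) h6
          · intro b hb hbi hbord
            have hble : b ≤ len + 1 := h7 b hb hbi hbord
            have hbne : b ≠ len + 1 := by
              intro he
              subst he
              have hd := bord_drop s hb (by omega) hbord
              have : s[i]? = s[len]? := by simpa using hd.2
              exact hcne this
            have hd := bord_drop s hb (by omega) hbord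
            have hnest : Bord s len (b - 1) := bord_nest s (by omega) (by omega) hd.1 h6
            have := Nat.le_findGreatest (m := b - 1) (n := len - 1) (by omega) hnest
            rw [show Nat.findGreatest (Bord s len) (len - 1) = pf s len from rfl] at this
            omega
          · omega
          · exact hj
    · rw [if_neg hi]
      exact h3 j (by omega)

theorem foldA (s : List Char) (tbl : List Nat)
    (h : ∀ j, j < s.length → tbl.getD j 0 = pf s (j+1)) :
    ∀ j, j ≤ s.length → ∀ acc,
      (List.range j).foldl (fun acc i => if tbl.getD i 0 > acc then tbl.getD i 0 else acc) acc
        = max acc (Vmax s j) := by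
  intro j
  induction j with
  | zero => intro _ acc; simp [Vmax]
  | succ j ih =>
      intro hj acc
      rw [List.range_succ, List.foldl_append, ih (by omega)]
      simp only [List.foldl_cons, List.foldl_nil, h j (by omega), Vmax]
      rcases Nat.le_total (pf s (j+1)) (max acc (Vmax s j)) with hle | hle
      · rw [if_neg (by omega)]; omega
      · by_cases he : pf s (j+1) > max acc (Vmax s j)
        · rw [if_pos he]; omega
        · rw [if_neg he]; omega


-- prefix-of-s matching at offset p (Zprop s p k ↔ a Z-value at p is ≥ k);
-- note Bord s n k is definitionally Zprop s (n-k) k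
abbrev Zprop (s : List Char) (p k : Nat) : Prop := s.take k = (s.drop p).take k

-- the Z-value at offset p: length of the longest match of the prefix at p
def zmax (s : List Char) (p : Nat) : Nat := Nat.findGreatest (Zprop s p) (s.length - p)

-- running maximum of zmax over offsets 1..j
def Zbest (s : List Char) : Nat → Nat
  | 0 => 0
  | j+1 => max (Zbest s j) (zmax s (j+1))

theorem zprop_iff (s : List Char) {p k : Nat} :
    Zprop s p k ↔ ∀ t, t < k → s[t]? = s[p + t]? := by
  constructor
  · intro h t ht
    have := congrArg (fun l => l[t]?) h
    simpa [List.getElem?_take, List.getElem?_drop, ht] using this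
  · intro h
    apply List.ext_getElem?_iff.mpr
    intro t
    by_cases ht : t < k
    · simp [List.getElem?_drop, ht, h t ht]
    · simp [ht]

theorem zprop_zero (s : List Char) (p : Nat) : Zprop s p 0 := rfl

theorem zmax_le (s : List Char) (p : Nat) : zmax s p ≤ s.length - p := Nat.findGreatest_le _

theorem zmax_zprop (s : List Char) (p : Nat) : Zprop s p (zmax s p) :=
  Nat.findGreatest_spec (Nat.zero_le _) (zprop_zero s p)

theorem zrun_eq (s : List Char) (p : Nat) (hp : 1 ≤ p) (k : Nat)
    (hk : ∀ t, t < k → s[t]? = s[p + t]?) (hkm : p + k ≤ s.length) :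
    zrun s p k = zmax s p := by
  rw [zrun]
  by_cases hcond : p + k < s.length ∧ s.getD k ' ' = s.getD (p + k) ' '
  · rw [if_pos hcond]
    have hnext : s[k]? = s[p + k]? :=
      (getD_eq_iff s (by omega) hcond.1).mp hcond.2
    exact zrun_eq s p hp (k+1)
      (by intro t ht
          rcases Nat.lt_or_ge t k with h | h
          · exact hk t h
          · rw [show t = k from by omega]; exact hnext)
      (by omega)
  · rw [if_neg hcond]
    apply Nat.le_antisymm
    · exact Nat.le_findGreatest (by omega) (zprop_iff s |>.mpr hk)
    · by_contra hgt
      have hg1 : k < zmax s p := by omega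
      have hprop := zmax_zprop s p
      rw [zprop_iff] at hprop
      have hle := zmax_le s p
      have hklt : p + k < s.length := by omega
      have := hprop k hg1
      have : s.getD k ' ' = s.getD (p + k) ' ' := (getD_eq_iff s (by omega) hklt).mpr this
      exact hcond ⟨hklt, this⟩
termination_by s.length - (p + k)
decreasing_by omega

theorem foldB (s : List Char)
    (h : ∀ p, 1 ≤ p → p ≤ s.length - 1 → zrun s p 0 = zmax s p) :
    ∀ j, j ≤ s.length - 1 → ∀ acc,
      (List.range' 1 j).foldl (fun best p => if zrun s p 0 > best then zrun s p 0 else best) acc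
        = max acc (Zbest s j) := by
  intro j
  induction j with
  | zero => intro _ acc; simp [Zbest]
  | succ j ih =>
      intro hj acc
      rw [List.range'_concat, List.foldl_append, ih (by omega)]
      simp only [List.foldl_cons, List.foldl_nil]
      rw [show 1 + 1 * j = j + 1 from by omega, h (j+1) (by omega) (by omega)]
      show _ = max acc (Zbest s (j+1))
      rw [show Zbest s (j+1) = max (Zbest s j) (zmax s (j+1)) from rfl]
      by_cases hgt : zmax s (j+1) > max acc (Zbest s j)
      · rw [if_pos hgt]; omega
      · rw [if_neg hgt]; omega

theorem Vmax_mono (s : List Char) : ∀ {a b : Nat}, a ≤ b → Vmax s a ≤ Vmax s b := by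
  intro a b hab
  induction b with
  | zero => simp [show a = 0 from by omega]
  | succ b ih =>
      rcases Nat.lt_or_ge a (b+1) with h | h
      · calc Vmax s a ≤ Vmax s b := ih (by omega)
          _ ≤ Vmax s (b+1) := Nat.le_max_left _ _
      · simp [show a = b + 1 from by omega]

theorem Zbest_mono (s : List Char) : ∀ {a b : Nat}, a ≤ b → Zbest s a ≤ Zbest s b := by
  intro a b hab
  induction b with
  | zero => simp [show a = 0 from by omega]
  | succ b ih =>
      rcases Nat.lt_or_ge a (b+1) with h | h
      · calc Zbest s a ≤ Zbest s b := ih (by omega)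
          _ ≤ Zbest s (b+1) := Nat.le_max_left _ _
      · simp [show a = b + 1 from by omega]

theorem zmax_le_Zbest (s : List Char) {p j : Nat} (hp : 1 ≤ p) (hj : p ≤ j) :
    zmax s p ≤ Zbest s j := by
  calc zmax s p ≤ Zbest s p := by
        rw [show p = (p - 1) + 1 from by omega]
        exact Nat.le_max_right _ _
    _ ≤ Zbest s j := Zbest_mono s hj

theorem pf_le_Vmax (s : List Char) {n j : Nat} (hn : 1 ≤ n) (hj : n ≤ j) :
    pf s n ≤ Vmax s j := by
  calc pf s n ≤ Vmax s n := by
        rw [show n = (n - 1) + 1 from by omega]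
        exact Nat.le_max_right _ _
    _ ≤ Vmax s j := Vmax_mono s hj

-- the border/occurrence duality: the maximal prefix-function value equals the maximal Z-value
theorem Vmax_eq_Zbest (s : List Char) : Vmax s s.length = Zbest s (s.length - 1) := by
  apply Nat.le_antisymm
  · -- every border is an occurrence of the prefix at a positive offset
    have : ∀ n, n ≤ s.length → Vmax s n ≤ Zbest s (s.length - 1) := by
      intro n
      induction n with
      | zero => intro _; simp [Vmax]
      | succ n ih =>
          intro hn
          have hpf : pf s (n+1) ≤ Zbest s (s.length - 1) := by
            by_cases hk0 : pf s (n+1) = 0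
            · omega
            · set k := pf s (n+1) with hk
              have hkn : k ≤ n := pf_le s (n+1)
              have hbord : Bord s (n+1) k := pf_bord s (n+1)
              -- Bord s (n+1) k is definitionally Zprop s (n+1-k) k
              have hz : Zprop s (n+1-k) k := hbord
              have hle : k ≤ zmax s (n+1-k) :=
                Nat.le_findGreatest (by omega) hz
              have := zmax_le_Zbest s (p := n+1-k) (j := s.length - 1) (by omega) (by omega)
              omega
          have := ih (by omega)
          show max (Vmax s n) (pf s (n+1)) ≤ _
          omega
    exact this s.length (le_refl _)
  · -- every occurrence of the prefix at a positive offset is a border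
    have : ∀ j, j ≤ s.length - 1 → Zbest s j ≤ Vmax s s.length := by
      intro j
      induction j with
      | zero => intro _; simp [Zbest]
      | succ j ih =>
          intro hj
          have hz : zmax s (j+1) ≤ Vmax s s.length := by
            by_cases hk0 : zmax s (j+1) = 0
            · omega
            · set k := zmax s (j+1) with hk
              set p := j + 1 with hpdef
              have hkm : k ≤ s.length - p := zmax_le s p
              have hzp : Zprop s p k := zmax_zprop s p
              have hbord : Bord s (p+k) k := by
                have : p + k - k = p := by omega
                show Zprop s (p + k - k) k
                rw [this]
                exact hzp
              have hle : k ≤ pf s (p+k) :=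
                Nat.le_findGreatest (by omega) hbord
              have := pf_le_Vmax s (n := p+k) (j := s.length) (by omega) (by omega)
              omega
          have := ih (by omega)
          show max (Zbest s j) (zmax s (j+1)) ≤ _
          omega
    exact this (s.length - 1) (le_refl _)


-- ===== VERDICT (by name: the statement is the Claim_ definition above) =====
theorem kmp_longest_prefix_suffix_spec : Claim_equal_kmp_longest_prefix_suffix := by
  intro pattern _
  show kmp_longest_prefix_suffix pattern = kmp_longest_prefix_suffix_alt pattern
  have htbl : ∀ j, j < pattern.toList.length →
      (kmp_preprocess pattern.toList).getD j 0 = pf pattern.toList (j+1) := by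
    intro j hj
    exact kmpLoop_inv pattern.toList (2 * pattern.toList.length) 1 0 _ (le_refl 1) (by omega)
      (by simp)
      (by intro j' hj'
          have : j' = 0 := by omega
          subst this
          simp [pf_one])
      (by omega) (bord_zero _ _) (by intro b hb hbi _; omega) (by omega) j hj
  have hA : kmp_longest_prefix_suffix pattern
      = Int.ofNat (max 0 (Vmax pattern.toList pattern.toList.length)) := by
    show Int.ofNat ((List.range pattern.toList.length).foldl
        (fun acc i => if (kmp_preprocess pattern.toList).getD i 0 > acc
          then (kmp_preprocess pattern.toList).getD i 0 else acc) 0) = _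
    rw [foldA pattern.toList (kmp_preprocess pattern.toList) htbl pattern.toList.length
      (le_refl _) 0]
  have hB : kmp_longest_prefix_suffix_alt pattern
      = Int.ofNat (max 0 (Zbest pattern.toList (pattern.toList.length - 1))) := by
    show Int.ofNat ((List.range' 1 (pattern.toList.length - 1)).foldl
      (fun best p => if zrun pattern.toList p 0 > best then zrun pattern.toList p 0 else best)
        0) = _
    rw [foldB pattern.toList
      (fun p hp hpm => zrun_eq pattern.toList p hp 0 (by omega) (by omega))
      (pattern.toList.length - 1) (le_refl _) 0]
  rw [hA, hB, Vmax_eq_Zbest]
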